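-- pv_equiv track=rewrite | github.com/tryskian/polinko | api/eval_viz.py | _expected_for_case
-- ===== SOURCE A (Python) =====
-- from typing import Any
--
-- def _normalize_text(value: Any, *, max_chars: int = 700) -> str:
--     text = " ".join(str(value or "").split())
--     if len(text) <= max_chars:
--         return text
--     return text[: max_chars - 1] + "..."
--
-- def _expected_for_case(case: dict[str, Any]) -> str:
--     must_contain = [str(item).strip() for item in case.get("must_contain", []) if str(item).strip()]
--     must_contain_any = [str(item).strip() for item in case.get("must_contain_any", []) if str(item).strip()]
--     must_appear_in_order = [
--         str(item).strip() for item in case.get("must_appear_in_order", []) if str(item).strip()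
--     ]
--     must_match_regex = [str(item).strip() for item in case.get("must_match_regex", []) if str(item).strip()]
--
--     expected_parts: list[str] = []
--     if must_contain:
--         expected_parts.append("contain: " + " | ".join(must_contain[:4]))
--     if must_contain_any:
--         expected_parts.append("contain any: " + " | ".join(must_contain_any[:4]))
--     if must_appear_in_order:
--         expected_parts.append("ordered: " + " -> ".join(must_appear_in_order[:4]))
--     if must_match_regex:
--         expected_parts.append("regex: " + " | ".join(must_match_regex[:2]))
--
--     if not expected_parts:
--         return "(none)"
--     return _normalize_text("; ".join(expected_parts), max_chars=360)
-- ===== SOURCE B (Python) =====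
-- from typing import Any
--
-- def _normalize_text(value: Any, *, max_chars: int = 700) -> str:
--     text = " ".join(str(value or "").split())
--     if len(text) <= max_chars:
--         return text
--     return text[: max_chars - 1] + "..."
--
-- def _expected_for_case(case: dict[str, Any]) -> str:
--     # Single streaming pass: each section is built item-by-item with a string
--     # accumulator and a countdown (stopping early once the cap is used up);
--     # the final description is accumulated directly, no intermediate lists,
--     # slices or join calls.
--     result = ""
--     for key, prefix, sep, cap in (
--         ("must_contain", "contain: ", " | ", 4),
--         ("must_contain_any", "contain any: ", " | ", 4),
--         ("must_appear_in_order", "ordered: ", " -> ", 4),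
--         ("must_match_regex", "regex: ", " | ", 2),
--     ):
--         part = None
--         for raw in case.get(key, []):
--             t = str(raw).strip()
--             if not t:
--                 continue
--             if part is None:
--                 part = prefix + t
--             elif cap > 0:
--                 part = part + sep + t
--             else:
--                 break
--             cap -= 1
--         if part is not None:
--             result = part if not result else result + "; " + part
--     return _normalize_text(result, max_chars=360) if result else "(none)"
-- ===== Notes on version B (the rewrite author's own statement) =====
-- stated objective: alternative
-- what changed: A builds four cleaned lists by comprehension, slices them to a cap and joins them into a parts list that is joined at the end; B is a single streaming pass that grows each section string item-by-item under a countdown with early break (no intermediate lists, no slicing, no join) and accumulates the final description string directly.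
import Mathlib
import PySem

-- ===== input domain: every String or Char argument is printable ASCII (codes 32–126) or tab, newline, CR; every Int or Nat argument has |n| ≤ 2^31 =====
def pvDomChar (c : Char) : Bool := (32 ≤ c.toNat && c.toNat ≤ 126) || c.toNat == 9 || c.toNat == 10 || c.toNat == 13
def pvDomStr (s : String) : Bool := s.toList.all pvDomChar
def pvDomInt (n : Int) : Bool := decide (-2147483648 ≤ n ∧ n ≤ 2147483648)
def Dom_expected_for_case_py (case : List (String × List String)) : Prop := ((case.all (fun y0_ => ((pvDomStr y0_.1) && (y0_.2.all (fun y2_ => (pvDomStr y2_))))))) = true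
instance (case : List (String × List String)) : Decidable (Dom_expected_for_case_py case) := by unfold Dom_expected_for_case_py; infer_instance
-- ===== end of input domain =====

-- B replaces A's staged passes (clean by comprehension, slice to a cap, join, collect parts,
-- join parts) by one streaming pass that grows each section string item-by-item under a
-- countdown with early break and accumulates the final description directly (objective: alternative).

-- shared-module helper _normalize_text (identical in Source A and Source B)
def pvNormalizeText (value : String) (maxChars : Int) : String :=
  let text := PySem.Str.join " " (PySem.Str.split₀ (if value ≠ "" then value else ""))
  if PySem.Str.len text ≤ maxChars then text
  else PySem.Str.join "" [PySem.Str.slice text none (some (maxChars - 1)), "..."]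

-- ===== PORT A =====
def expected_for_case_py (case : List (String × List String)) : String :=
  let must_contain := (PySem.Dict.getD (PySem.Dict.mk case) "must_contain" []).filterMap
    (fun item => let t := PySem.Str.strip item; if t ≠ "" then some t else none)
  let must_contain_any := (PySem.Dict.getD (PySem.Dict.mk case) "must_contain_any" []).filterMap
    (fun item => let t := PySem.Str.strip item; if t ≠ "" then some t else none)
  let must_appear_in_order := (PySem.Dict.getD (PySem.Dict.mk case) "must_appear_in_order" []).filterMap
    (fun item => let t := PySem.Str.strip item; if t ≠ "" then some t else none)
  let must_match_regex := (PySem.Dict.getD (PySem.Dict.mk case) "must_match_regex" []).filterMap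
    (fun item => let t := PySem.Str.strip item; if t ≠ "" then some t else none)
  let expected_parts : List String := []
  let expected_parts := if must_contain ≠ [] then
    expected_parts ++ [PySem.Str.join "" ["contain: ", PySem.Str.join " | " (must_contain.take 4)]] else expected_parts
  let expected_parts := if must_contain_any ≠ [] then
    expected_parts ++ [PySem.Str.join "" ["contain any: ", PySem.Str.join " | " (must_contain_any.take 4)]] else expected_parts
  let expected_parts := if must_appear_in_order ≠ [] then
    expected_parts ++ [PySem.Str.join "" ["ordered: ", PySem.Str.join " -> " (must_appear_in_order.take 4)]] else expected_parts
  let expected_parts := if must_match_regex ≠ [] then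
    expected_parts ++ [PySem.Str.join "" ["regex: ", PySem.Str.join " | " (must_match_regex.take 2)]] else expected_parts
  if expected_parts = [] then "(none)"
  else pvNormalizeText (PySem.Str.join "; " expected_parts) 360

-- ===== PORT B =====
-- inner streaming loop of Source B: state = (part : Option String, cap); break once cap is used up
def pvSectionLoop (pre sep : String) : List String → Int → Option String → Option String
  | [], _, part => part
  | raw :: rest, cap, part =>
    let t := PySem.Str.strip raw
    if t = "" then pvSectionLoop pre sep rest cap part
    else
      match part with
      | none => pvSectionLoop pre sep rest (cap - 1) (some (PySem.Str.join "" [pre, t]))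
      | some p =>
        if cap > 0 then pvSectionLoop pre sep rest (cap - 1) (some (PySem.Str.join "" [p, sep, t]))
        else some p

def pvSpecs : List (String × String × String × Int) :=
  [("must_contain", "contain: ", " | ", 4),
   ("must_contain_any", "contain any: ", " | ", 4),
   ("must_appear_in_order", "ordered: ", " -> ", 4),
   ("must_match_regex", "regex: ", " | ", 2)]

def expected_for_case_py_alt (case : List (String × List String)) : String :=
  let result := pvSpecs.foldl (fun result spec =>
    match pvSectionLoop spec.2.1 spec.2.2.1 (PySem.Dict.getD (PySem.Dict.mk case) spec.1 []) spec.2.2.2 none with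
    | none => result
    | some part => if result = "" then part else PySem.Str.join "" [result, "; ", part]) ""
  if result ≠ "" then pvNormalizeText result 360 else "(none)"

-- ===== PRECONDITION & SPEC =====
def Spec_expected_for_case_py (case : List (String × List String)) (out : String) : Prop := out = expected_for_case_py_alt case
instance (case : List (String × List String)) (out : String) : Decidable (Spec_expected_for_case_py case out) := by unfold Spec_expected_for_case_py; infer_instance

-- ===== CLAIM (what is proved, stated in full; the proofs are below) =====
def Claim_equal_expected_for_case_py : Prop := ∀ (case : List (String × List String)), Dom_expected_for_case_py case → Spec_expected_for_case_py case (expected_for_case_py case)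

-- ===== LEMMAS AND PROOFS =====

-- the cleaned list both programs effectively work with
def pvClean (xs : List String) : List String :=
  xs.filterMap (fun item => let t := PySem.Str.strip item; if t ≠ "" then some t else none)

-- string concatenations are disentangled on the toList side
theorem pv_toList_join2 (a b : String) :
    (PySem.Str.join "" [a, b]).toList = a.toList ++ b.toList := by
  simp [PySem.Str.toList_join, PySem.Chars.join_cons_cons, PySem.Chars.join_singleton]

theorem pv_toList_join3 (a b c : String) :
    (PySem.Str.join "" [a, b, c]).toList = a.toList ++ b.toList ++ c.toList := by
  simp [PySem.Str.toList_join, PySem.Chars.join_cons_cons, PySem.Chars.join_singleton]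

-- sep.join(p :: ps) as the left fold Source B's accumulator performs
theorem pv_join_eq_foldl (sep : String) (p : String) (ps : List String) :
    PySem.Str.join sep (p :: ps) = ps.foldl (fun a t => PySem.Str.join "" [a, sep, t]) p := by
  induction ps generalizing p with
  | nil =>
    apply String.toList_inj.mp
    simp [PySem.Str.toList_join, PySem.Chars.join_singleton]
  | cons q rest ih =>
    simp only [List.foldl_cons]
    rw [← ih (PySem.Str.join "" [p, sep, q])]
    apply String.toList_inj.mp
    cases rest <;>
      simp [PySem.Str.toList_join, PySem.Chars.join_cons_cons, PySem.Chars.join_singleton]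

-- prefixing distributes into the fold
theorem pv_prefix_foldl (sep pre : String) (l : List String) (x : String) :
    PySem.Str.join "" [pre, l.foldl (fun a t => PySem.Str.join "" [a, sep, t]) x]
      = l.foldl (fun a t => PySem.Str.join "" [a, sep, t]) (PySem.Str.join "" [pre, x]) := by
  induction l generalizing x with
  | nil => simp
  | cons q rest ih =>
    simp only [List.foldl_cons]
    rw [ih (PySem.Str.join "" [x, sep, q])]
    congr 1
    apply String.toList_inj.mp
    simp [PySem.Str.toList_join, PySem.Chars.join_cons_cons, PySem.Chars.join_singleton]

-- once a part exists the loop appends the next (cap) cleaned items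
theorem pv_sectionLoop_some (pre sep : String) (xs : List String) (cap : Int) (o : String) :
    pvSectionLoop pre sep xs cap (some o)
      = some (((pvClean xs).take cap.toNat).foldl (fun a t => PySem.Str.join "" [a, sep, t]) o) := by
  induction xs generalizing cap o with
  | nil => simp [pvSectionLoop, pvClean]
  | cons x rest ih =>
    by_cases hx : PySem.Str.strip x = ""
    · simp [pvSectionLoop, hx, pvClean, ih]
    · by_cases hc : cap > 0
      · have hnat : (cap - 1).toNat = cap.toNat - 1 := by omega
        have hpos : cap.toNat = (cap.toNat - 1) + 1 := by omega
        simp only [pvSectionLoop, hx, if_pos hc, ih]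
        rw [show (pvClean (x :: rest)) = PySem.Str.strip x :: pvClean rest by
              simp [pvClean, hx]]
        rw [hpos, List.take_succ_cons, List.foldl_cons, hnat]
        rfl
      · have : cap.toNat = 0 := by omega
        simp [pvSectionLoop, hx, hc, this]

-- the inner loop of Source B computes clean-take-join with the prefix attached (cap ≥ 1)
theorem pv_sectionLoop_eq (pre sep : String) (xs : List String) (cap : Int) (hcap : 1 ≤ cap) :
    pvSectionLoop pre sep xs cap none
      = if pvClean xs = [] then none
        else some (PySem.Str.join "" [pre, PySem.Str.join sep ((pvClean xs).take cap.toNat)]) := by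
  induction xs generalizing cap with
  | nil => simp [pvSectionLoop, pvClean]
  | cons x rest ih =>
    by_cases hx : PySem.Str.strip x = ""
    · simpa [pvSectionLoop, hx, pvClean] using ih cap hcap
    · have hclean : pvClean (x :: rest) = PySem.Str.strip x :: pvClean rest := by
        simp [pvClean, hx]
      have hnat : (cap - 1).toNat = cap.toNat - 1 := by omega
      have hpos : cap.toNat = (cap.toNat - 1) + 1 := by omega
      simp only [pvSectionLoop, if_neg hx, pv_sectionLoop_some, hclean]
      rw [if_neg (by simp), hpos, List.take_succ_cons, hnat,
        pv_join_eq_foldl sep (PySem.Str.strip x) (List.take (cap.toNat - 1) (pvClean rest)),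
        pv_prefix_foldl sep pre (List.take (cap.toNat - 1) (pvClean rest)) (PySem.Str.strip x)]

-- Source B's outer accumulation over the present parts equals "; ".join
def pvStep (result : String) (p? : Option String) : String :=
  match p? with
  | none => result
  | some part => if result = "" then part else PySem.Str.join "" [result, "; ", part]

-- a nonempty piece keeps every concatenation nonempty
theorem pv_join3_ne (a b c : String) (ha : a ≠ "") : PySem.Str.join "" [a, b, c] ≠ "" := by
  intro h
  have h' := congrArg String.toList h
  rw [pv_toList_join3] at h'
  simp at h'
  exact ha h'.1

theorem pv_part_ne (pre z : String) (h : pre ≠ "") : PySem.Str.join "" [pre, z] ≠ "" := by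
  intro he
  have h' := congrArg String.toList he
  rw [pv_toList_join2] at h'
  simp at h'
  exact h h'.1

theorem pv_joinsemi_ne (p : String) (ps : List String) (hp : p ≠ "") :
    PySem.Str.join "; " (p :: ps) ≠ "" := by
  cases ps with
  | nil =>
    intro h; apply hp
    have h' := congrArg String.toList h
    rw [PySem.Str.toList_join] at h'
    simp [PySem.Chars.join_singleton] at h'
    exact h'
  | cons q rest =>
    intro h; apply hp
    have h' := congrArg String.toList h
    rw [PySem.Str.toList_join] at h'
    simp [PySem.Chars.join_cons_cons] at h' 

theorem pv_foldl_step_some (opts : List (Option String)) (o : String) (ho : o ≠ "") :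
    opts.foldl pvStep o
      = (opts.filterMap id).foldl (fun a p => PySem.Str.join "" [a, "; ", p]) o := by
  induction opts generalizing o with
  | nil => rfl
  | cons x rest ih =>
    cases x with
    | none => simpa [pvStep] using ih o ho
    | some p =>
      simp only [List.foldl_cons, List.filterMap_cons, pvStep, if_neg ho]
      exact ih _ (pv_join3_ne o "; " p ho)

theorem pv_foldl_step_eq_join (opts : List (Option String))
    (h : ∀ s ∈ opts.filterMap id, s ≠ "") :
    opts.foldl pvStep "" = PySem.Str.join "; " (opts.filterMap id) := by
  induction opts with
  | nil =>
    apply String.toList_inj.mp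
    simp [PySem.Str.toList_join, PySem.Chars.join_nil]
  | cons x rest ih =>
    cases x with
    | none =>
      simp only [List.filterMap_cons] at h ⊢
      simpa [pvStep] using ih h
    | some p =>
      have hp : p ≠ "" := h p (by simp)
      simp only [List.foldl_cons, List.filterMap_cons, id_eq]
      rw [show pvStep "" (some p) = p from by simp [pvStep]]
      rw [pv_foldl_step_some rest p hp, pv_join_eq_foldl]
      rfl

-- A's chained conditional appends build exactly the list of present parts
theorem pv_chain (c1 c2 c3 c4 : List String) (s1 s2 s3 s4 : String) :
    (let p0 : List String := []
     let p1 := if c1 ≠ [] then p0 ++ [s1] else p0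
     let p2 := if c2 ≠ [] then p1 ++ [s2] else p1
     let p3 := if c3 ≠ [] then p2 ++ [s3] else p2
     if c4 ≠ [] then p3 ++ [s4] else p3)
      = ([if c1 = [] then none else some s1, if c2 = [] then none else some s2,
          if c3 = [] then none else some s3, if c4 = [] then none else some s4].filterMap id) := by
  split_ifs <;> simp_all

-- the two endgames agree on any parts list of nonempty strings
theorem pv_final (opts : List (Option String)) (h : ∀ s ∈ opts.filterMap id, s ≠ "") :
    (if opts.filterMap id = [] then "(none)"
     else pvNormalizeText (PySem.Str.join "; " (opts.filterMap id)) 360)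
      = (if opts.foldl pvStep "" ≠ "" then pvNormalizeText (opts.foldl pvStep "") 360
         else "(none)") := by
  rw [pv_foldl_step_eq_join opts h]
  cases hp : opts.filterMap id with
  | nil =>
    have hj : PySem.Str.join "; " ([] : List String) = "" := by
      apply String.toList_inj.mp
      simp [PySem.Str.toList_join, PySem.Chars.join_nil]
    simp [hj]
  | cons p ps =>
    have hp' : p ≠ "" := h p (hp ▸ List.mem_cons_self)
    have hne := pv_joinsemi_ne p ps hp'
    simp [hne]

-- both endgames, stated over the four cleaned lists and section strings
theorem pv_main (c1 c2 c3 c4 : List String) (s1 s2 s3 s4 : String)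
    (h1 : s1 ≠ "") (h2 : s2 ≠ "") (h3 : s3 ≠ "") (h4 : s4 ≠ "") :
    (let p0 : List String := []
     let p1 := if c1 ≠ [] then p0 ++ [s1] else p0
     let p2 := if c2 ≠ [] then p1 ++ [s2] else p1
     let p3 := if c3 ≠ [] then p2 ++ [s3] else p2
     let p4 := if c4 ≠ [] then p3 ++ [s4] else p3
     if p4 = [] then "(none)" else pvNormalizeText (PySem.Str.join "; " p4) 360)
    = (let o1 : Option String := if c1 = [] then none else some s1
       let o2 : Option String := if c2 = [] then none else some s2
       let o3 : Option String := if c3 = [] then none else some s3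
       let o4 : Option String := if c4 = [] then none else some s4
       let r := [o1, o2, o3, o4].foldl pvStep ""
       if r ≠ "" then pvNormalizeText r 360 else "(none)") := by
  have hch := pv_chain c1 c2 c3 c4 s1 s2 s3 s4
  have hopts : ∀ s ∈ ([if c1 = [] then none else some s1, if c2 = [] then none else some s2,
      if c3 = [] then none else some s3, if c4 = [] then none else some s4].filterMap
        (id : Option String → Option String)), s ≠ "" := by
    intro s hs
    simp only [List.mem_filterMap, List.mem_cons, List.not_mem_nil, or_false] at hs
    obtain ⟨o, ho, hid⟩ := hs
    simp only [id_eq] at hid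
    rcases ho with rfl | rfl | rfl | rfl <;> split at hid <;> simp_all
  have hfin := pv_final _ hopts
  dsimp only at hch hfin ⊢
  rw [hch]
  exact hfin

-- ===== VERDICT (by name: the statement is the Claim_ definition above) =====
theorem expected_for_case_py_spec : Claim_equal_expected_for_case_py := by
  intro case _
  unfold Spec_expected_for_case_py
  have hB : expected_for_case_py_alt case =
      (let o1 : Option String := if pvClean (PySem.Dict.getD (PySem.Dict.mk case) "must_contain" []) = [] then none
          else some (PySem.Str.join "" ["contain: ", PySem.Str.join " | " ((pvClean (PySem.Dict.getD (PySem.Dict.mk case) "must_contain" [])).take (4 : Int).toNat)])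
       let o2 : Option String := if pvClean (PySem.Dict.getD (PySem.Dict.mk case) "must_contain_any" []) = [] then none
          else some (PySem.Str.join "" ["contain any: ", PySem.Str.join " | " ((pvClean (PySem.Dict.getD (PySem.Dict.mk case) "must_contain_any" [])).take (4 : Int).toNat)])
       let o3 : Option String := if pvClean (PySem.Dict.getD (PySem.Dict.mk case) "must_appear_in_order" []) = [] then none
          else some (PySem.Str.join "" ["ordered: ", PySem.Str.join " -> " ((pvClean (PySem.Dict.getD (PySem.Dict.mk case) "must_appear_in_order" [])).take (4 : Int).toNat)])
       let o4 : Option String := if pvClean (PySem.Dict.getD (PySem.Dict.mk case) "must_match_regex" []) = [] then none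
          else some (PySem.Str.join "" ["regex: ", PySem.Str.join " | " ((pvClean (PySem.Dict.getD (PySem.Dict.mk case) "must_match_regex" [])).take (2 : Int).toNat)])
       let r := [o1, o2, o3, o4].foldl pvStep ""
       if r ≠ "" then pvNormalizeText r 360 else "(none)") := by
    unfold expected_for_case_py_alt
    simp only [pvSpecs, List.foldl_cons, List.foldl_nil]
    rw [pv_sectionLoop_eq "contain: " " | " _ 4 (by norm_num),
        pv_sectionLoop_eq "contain any: " " | " _ 4 (by norm_num),
        pv_sectionLoop_eq "ordered: " " -> " _ 4 (by norm_num),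
        pv_sectionLoop_eq "regex: " " | " _ 2 (by norm_num)]
    rfl
  rw [hB]
  exact pv_main _ _ _ _ _ _ _ _
    (pv_part_ne _ _ (by decide)) (pv_part_ne _ _ (by decide))
    (pv_part_ne _ _ (by decide)) (pv_part_ne _ _ (by decide))
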